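-- pv_equiv track=rewrite | github.com/HarivaradhanKM/Python_Coding | IDP - Answers/IDP 4 Easy 2.py | count_doctors_during_inspections
-- ===== SOURCE A (Python) =====
-- def count_doctors_during_inspections(inspection_times, doctor_schedules):
--     doctors_available = []
--     doctor_schedules.sort()
--     for inspection_time in inspection_times:
--         doctors_count = 0
--         for doctor_schedule in doctor_schedules:
--             shift_start_time = doctor_schedule[0]
--             shift_end_time = doctor_schedule[1]
--             if shift_start_time <= inspection_time and inspection_time <= shift_end_time:
--                 doctors_count += 1
--
--         doctors_available.append(str(doctors_count))
--
--     return doctors_available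
-- ===== SOURCE B (Python) =====
-- def _bisect_right(xs, t):
--     # first index lo in sorted xs with xs[lo] > t  (= number of elements <= t)
--     lo, hi = 0, len(xs)
--     while lo < hi:
--         mid = (lo + hi) // 2
--         if xs[mid] <= t:
--             lo = mid + 1
--         else:
--             hi = mid
--     return lo
--
--
-- def _bisect_left(xs, t):
--     # first index lo in sorted xs with xs[lo] >= t  (= number of elements < t)
--     lo, hi = 0, len(xs)
--     while lo < hi:
--         mid = (lo + hi) // 2
--         if xs[mid] < t:
--             lo = mid + 1
--         else:
--             hi = mid
--     return lo
--
--
-- def count_doctors_during_inspections(inspection_times, doctor_schedules):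
--     doctor_schedules.sort()  # keep A's observable in-place sort
--     valid = [d for d in doctor_schedules if d[0] <= d[1]]  # empty shifts cover nothing
--     starts = sorted(d[0] for d in valid)
--     ends = sorted(d[1] for d in valid)
--     return [str(_bisect_right(starts, t) - _bisect_left(ends, t))
--             for t in inspection_times]
-- ===== Notes on version B (the rewrite author's own statement) =====
-- stated objective: faster
-- what changed: Instead of scanning every schedule for every inspection time, B sorts the shift start and end times once and answers each inspection time with two binary searches: count = #(starts <= t) - #(ends < t), skipping empty shifts (start > end) which cover no time.
-- outside the precondition, e.g. on count_doctors_during_inspections([], [[1]]): A returns [], B raises IndexError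
import Mathlib
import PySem

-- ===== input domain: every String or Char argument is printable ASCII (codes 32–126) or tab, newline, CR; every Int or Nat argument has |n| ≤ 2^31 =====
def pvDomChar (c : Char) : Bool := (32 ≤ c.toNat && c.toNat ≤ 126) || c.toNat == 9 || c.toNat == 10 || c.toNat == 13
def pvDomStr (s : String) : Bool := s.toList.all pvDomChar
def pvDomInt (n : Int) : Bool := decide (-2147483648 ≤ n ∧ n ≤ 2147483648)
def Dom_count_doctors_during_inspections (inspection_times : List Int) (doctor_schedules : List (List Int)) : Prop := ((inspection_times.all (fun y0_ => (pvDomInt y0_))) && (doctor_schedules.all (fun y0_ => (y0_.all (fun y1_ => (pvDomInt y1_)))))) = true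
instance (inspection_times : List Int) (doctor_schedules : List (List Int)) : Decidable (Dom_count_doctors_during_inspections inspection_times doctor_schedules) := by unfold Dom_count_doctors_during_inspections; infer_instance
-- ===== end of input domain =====

-- B replaces A's scan of every schedule per inspection time by two binary searches over the
-- once-sorted start/end times (asymptotically faster, measured). Both programs sort
-- doctor_schedules in place (a caller-visible mutation); the equivalence proved here is about
-- the RETURN value.

-- shared helper: d[0] / d[1] via Python indexing; exact (pyGet? = some) whenever the schedule
-- has ≥ 2 entries, which Pre_ guarantees; the default 0 is never reached inside Pre_.
def pvFst (d : List Int) : Int := (PySem.List.pyGet? d 0).getD 0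
def pvSnd (d : List Int) : Int := (PySem.List.pyGet? d 1).getD 0

-- ===== PORT A =====
def count_doctors_during_inspections (inspection_times : List Int) (doctor_schedules : List (List Int)) : List String :=
  -- doctor_schedules.sort() : Python's in-place lexicographic sort
  let ds := PySem.List.sorted doctor_schedules (fun d => d)
  inspection_times.foldl
    (fun doctors_available inspection_time =>
      let doctors_count : Int :=
        ds.foldl
          (fun doctors_count doctor_schedule =>
            let shift_start_time := pvFst doctor_schedule
            let shift_end_time := pvSnd doctor_schedule
            if shift_start_time ≤ inspection_time ∧ inspection_time ≤ shift_end_time then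
              doctors_count + 1
            else doctors_count)
          0
      doctors_available ++ [PySem.Int.toStr doctors_count])
    []

-- ===== PORT B =====
-- hand-written binary search of Source B (_bisect_right): xs[mid] with 0 ≤ lo ≤ mid < hi ≤ len(xs),
-- so List.getD mid 0 is exact; (lo+hi)//2 on nonnegative ints is Nat division.
def pvCountLE (xs : List Int) (t : Int) (lo hi : Nat) : Nat :=
  if _h : lo < hi then
    if xs.getD ((lo + hi) / 2) 0 ≤ t then pvCountLE xs t ((lo + hi) / 2 + 1) hi
    else pvCountLE xs t lo ((lo + hi) / 2)
  else lo
termination_by hi - lo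
decreasing_by all_goals omega

-- _bisect_left of Source B, same conventions
def pvCountLT (xs : List Int) (t : Int) (lo hi : Nat) : Nat :=
  if _h : lo < hi then
    if xs.getD ((lo + hi) / 2) 0 < t then pvCountLT xs t ((lo + hi) / 2 + 1) hi
    else pvCountLT xs t lo ((lo + hi) / 2)
  else lo
termination_by hi - lo
decreasing_by all_goals omega

def count_doctors_during_inspections_alt (inspection_times : List Int) (doctor_schedules : List (List Int)) : List String :=
  let ds := PySem.List.sorted doctor_schedules (fun d => d)   -- doctor_schedules.sort()
  let valid := ds.filter (fun d => pvFst d ≤ pvSnd d)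
  let starts := PySem.List.sorted (valid.map pvFst) (fun x => x)
  let ends := PySem.List.sorted (valid.map pvSnd) (fun x => x)
  inspection_times.map (fun t =>
    PySem.Int.toStr ((pvCountLE starts t 0 starts.length : Int) - (pvCountLT ends t 0 ends.length : Int)))

-- ===== PRECONDITION & SPEC =====
-- Pre_ excludes inputs containing a schedule with fewer than two entries: on those A raises
-- IndexError whenever inspection_times is non-empty (and B always raises), so the only excluded
-- inputs on which A still returns are ([], schedules-with-a-short-entry), where A returns [].
def Pre_count_doctors_during_inspections (inspection_times : List Int) (doctor_schedules : List (List Int)) : Prop :=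
  ∀ d ∈ doctor_schedules, 2 ≤ d.length
instance (inspection_times : List Int) (doctor_schedules : List (List Int)) : Decidable (Pre_count_doctors_during_inspections inspection_times doctor_schedules) := by unfold Pre_count_doctors_during_inspections; infer_instance

def pvWitness_count_doctors_during_inspections : List Int × List (List Int) := ([1, 5, 9], [[0, 3], [2, 8]])

def Spec_count_doctors_during_inspections (inspection_times : List Int) (doctor_schedules : List (List Int)) (out : List String) : Prop := out = count_doctors_during_inspections_alt inspection_times doctor_schedules
instance (inspection_times : List Int) (doctor_schedules : List (List Int)) (out : List String) : Decidable (Spec_count_doctors_during_inspections inspection_times doctor_schedules out) := by unfold Spec_count_doctors_during_inspections; infer_instance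

-- ===== CLAIM (what is proved, stated in full; the proofs are below) =====
def Claim_equal_count_doctors_during_inspections : Prop := ∀ (inspection_times : List Int) (doctor_schedules : List (List Int)), Dom_count_doctors_during_inspections inspection_times doctor_schedules → Pre_count_doctors_during_inspections inspection_times doctor_schedules → Spec_count_doctors_during_inspections inspection_times doctor_schedules (count_doctors_during_inspections inspection_times doctor_schedules)

-- ===== LEMMAS AND PROOFS =====

-- If everything strictly before position n satisfies p and everything from n on fails p,
-- then countP p = n.
lemma pv_countP_eq_of_split (xs : List Int) (p : Int → Bool) (n : Nat) (hn : n ≤ xs.length)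
    (h1 : ∀ j, j < n → p (xs.getD j 0))
    (h2 : ∀ j, n ≤ j → j < xs.length → ¬ p (xs.getD j 0)) :
    xs.countP p = n := by
  have hsplit : xs = xs.take n ++ xs.drop n := (List.take_append_drop n xs).symm
  rw [hsplit, List.countP_append]
  have htake : (xs.take n).countP p = (xs.take n).length := by
    rw [List.countP_eq_length]
    intro a ha
    rcases List.mem_iff_getElem.mp ha with ⟨j, hj, rfl⟩
    have hjn : j < n := by
      have := hj; simp [List.length_take] at this; omega
    have hjx : j < xs.length := by omega
    have : (xs.take n)[j] = xs[j] := List.getElem_take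
    rw [this, ← List.getD_eq_getElem xs 0 hjx]
    exact h1 j hjn
  have hdrop : (xs.drop n).countP p = 0 := by
    rw [List.countP_eq_zero]
    intro a ha
    rcases List.mem_iff_getElem.mp ha with ⟨j, hj, rfl⟩
    have hjx : n + j < xs.length := by
      have := hj; simp [List.length_drop] at this; omega
    have : (xs.drop n)[j] = xs[n + j] := by
      simp [List.getElem_drop]
    rw [this, ← List.getD_eq_getElem xs 0 hjx]
    exact h2 (n + j) (by omega) hjx
  rw [htake, hdrop, List.length_take]
  omega

lemma pv_countLE_eq (xs : List Int) (t : Int) (hs : xs.Pairwise (· ≤ ·)) :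
    ∀ lo hi, lo ≤ hi → hi ≤ xs.length →
    (∀ j, j < lo → xs.getD j 0 ≤ t) →
    (∀ j, hi ≤ j → j < xs.length → t < xs.getD j 0) →
    pvCountLE xs t lo hi = xs.countP (fun x => decide (x ≤ t)) := by
  intro lo hi hlohi hhi h1 h2
  fun_induction pvCountLE xs t lo hi with
  | case1 lo hi hlt hmid ih =>
    apply ih (by omega) hhi
    · intro j hj
      rcases Nat.lt_or_ge j ((lo + hi) / 2) with hjm | hjm
      · have hjx : j < xs.length := by omega
        have hmx : (lo + hi) / 2 < xs.length := by omega
        have hle : xs[j] ≤ xs[(lo + hi) / 2] :=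
          (List.pairwise_iff_getElem.mp hs) j ((lo + hi) / 2) hjx hmx hjm
        have := hmid
        rw [List.getD_eq_getElem xs 0 hmx] at this
        rw [List.getD_eq_getElem xs 0 hjx]
        exact le_trans hle this
      · have : j = (lo + hi) / 2 := by omega
        rw [this]; exact hmid
    · exact h2
  | case2 lo hi hlt hmid ih =>
    apply ih (by omega) (by omega) h1
    intro j hj hjx
    have hmx : (lo + hi) / 2 < xs.length := by omega
    have hle : xs[(lo + hi) / 2] ≤ xs[j] := by
      rcases Nat.lt_or_ge ((lo + hi) / 2) j with h | h
      · exact (List.pairwise_iff_getElem.mp hs) ((lo + hi) / 2) j hmx hjx h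
      · have : j = (lo + hi) / 2 := by omega
        subst this
        exact le_refl _
    have hmt : t < xs[(lo + hi) / 2] := by
      have := hmid
      rw [List.getD_eq_getElem xs 0 hmx] at this
      omega
    rw [List.getD_eq_getElem xs 0 hjx]
    omega
  | case3 lo hi hge =>
    have heq : lo = hi := by omega
    subst heq
    exact (pv_countP_eq_of_split xs _ lo (by omega)
      (fun j hj => by simpa using h1 j hj)
      (fun j hj hjx => by simpa using h2 j hj hjx)).symm

lemma pv_countLT_eq (xs : List Int) (t : Int) (hs : xs.Pairwise (· ≤ ·)) :
    ∀ lo hi, lo ≤ hi → hi ≤ xs.length →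
    (∀ j, j < lo → xs.getD j 0 < t) →
    (∀ j, hi ≤ j → j < xs.length → t ≤ xs.getD j 0) →
    pvCountLT xs t lo hi = xs.countP (fun x => decide (x < t)) := by
  intro lo hi hlohi hhi h1 h2
  fun_induction pvCountLT xs t lo hi with
  | case1 lo hi hlt hmid ih =>
    apply ih (by omega) hhi
    · intro j hj
      rcases Nat.lt_or_ge j ((lo + hi) / 2) with hjm | hjm
      · have hjx : j < xs.length := by omega
        have hmx : (lo + hi) / 2 < xs.length := by omega
        have hle : xs[j] ≤ xs[(lo + hi) / 2] :=
          (List.pairwise_iff_getElem.mp hs) j ((lo + hi) / 2) hjx hmx hjm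
        have := hmid
        rw [List.getD_eq_getElem xs 0 hmx] at this
        rw [List.getD_eq_getElem xs 0 hjx]
        omega
      · have : j = (lo + hi) / 2 := by omega
        rw [this]; exact hmid
    · exact h2
  | case2 lo hi hlt hmid ih =>
    apply ih (by omega) (by omega) h1
    intro j hj hjx
    have hmx : (lo + hi) / 2 < xs.length := by omega
    have hle : xs[(lo + hi) / 2] ≤ xs[j] := by
      rcases Nat.lt_or_ge ((lo + hi) / 2) j with h | h
      · exact (List.pairwise_iff_getElem.mp hs) ((lo + hi) / 2) j hmx hjx h
      · have : j = (lo + hi) / 2 := by omega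
        subst this
        exact le_refl _
    have hmt : t ≤ xs[(lo + hi) / 2] := by
      have := hmid
      rw [List.getD_eq_getElem xs 0 hmx] at this
      omega
    rw [List.getD_eq_getElem xs 0 hjx]
    omega
  | case3 lo hi hge =>
    have heq : lo = hi := by omega
    subst heq
    exact (pv_countP_eq_of_split xs _ lo (by omega)
      (fun j hj => by simpa using h1 j hj)
      (fun j hj hjx => by simpa using h2 j hj hjx)).symm

-- the per-element identity: [s ≤ t ∧ t ≤ e] = [s ≤ t ∧ s ≤ e] - [e < t ∧ s ≤ e], summed
lemma pv_count_diff (t : Int) (l : List (List Int)) :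
    ((l.countP fun d => decide (pvFst d ≤ t) && decide (t ≤ pvSnd d)) : Int)
      = ((l.countP fun d => decide (pvFst d ≤ t) && decide (pvFst d ≤ pvSnd d)) : Int)
        - ((l.countP fun d => decide (pvSnd d < t) && decide (pvFst d ≤ pvSnd d)) : Int) := by
  induction l with
  | nil => simp
  | cons d l ih =>
    simp only [List.countP_cons]
    push_cast
    by_cases h1 : pvFst d ≤ t <;> by_cases h2 : t ≤ pvSnd d <;> by_cases h3 : pvFst d ≤ pvSnd d <;>
      simp [h1, h2, h3] <;> omega

-- the central per-inspection-time identity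
lemma pv_main (inspection_times : List Int) (doctor_schedules : List (List Int)) :
    count_doctors_during_inspections inspection_times doctor_schedules
      = count_doctors_during_inspections_alt inspection_times doctor_schedules := by
  unfold count_doctors_during_inspections count_doctors_during_inspections_alt
  simp only []
  rw [PySem.List.foldl_append_singleton_eq_map]
  simp only [List.nil_append]
  apply List.map_congr_left
  intro t _
  congr 1
  -- A's inner loop as a countP over the sorted schedules
  set ds := PySem.List.sorted doctor_schedules (fun d => d) with hds
  have hA : (ds.foldl
      (fun doctors_count doctor_schedule =>
        let shift_start_time := pvFst doctor_schedule
        let shift_end_time := pvSnd doctor_schedule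
        if shift_start_time ≤ t ∧ t ≤ shift_end_time then doctors_count + 1 else doctors_count)
      (0 : Int))
      = ((ds.countP fun d => decide (pvFst d ≤ t) && decide (t ≤ pvSnd d)) : Int) := by
    have := PySem.List.foldl_count_if (fun d => decide (pvFst d ≤ t) && decide (t ≤ pvSnd d)) ds (0 : Int)
    simpa using this
  rw [hA]
  -- B's two binary searches as countPs
  set valid := ds.filter (fun d => pvFst d ≤ pvSnd d) with hvalid
  set starts := PySem.List.sorted (valid.map pvFst) (fun x => x) with hstarts
  set ends := PySem.List.sorted (valid.map pvSnd) (fun x => x) with hends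
  have hps : starts.Pairwise (· ≤ ·) := by
    simpa using PySem.List.sorted_pairwise (valid.map pvFst) (fun x => x)
  have hpe : ends.Pairwise (· ≤ ·) := by
    simpa using PySem.List.sorted_pairwise (valid.map pvSnd) (fun x => x)
  rw [pv_countLE_eq starts t hps 0 starts.length (by omega) (by omega)
        (fun j hj => absurd hj (by omega)) (fun j hj hjx => absurd hjx (by omega)),
      pv_countLT_eq ends t hpe 0 ends.length (by omega) (by omega)
        (fun j hj => absurd hj (by omega)) (fun j hj hjx => absurd hjx (by omega))]
  -- push countPs back through sorted / map / filter
  have hcs : starts.countP (fun x => decide (x ≤ t))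
      = valid.countP (fun d => decide (pvFst d ≤ t)) := by
    rw [(PySem.List.sorted_perm (valid.map pvFst) (fun x => x) false).countP_eq,
        List.countP_map]
    rfl
  have hce : ends.countP (fun x => decide (x < t))
      = valid.countP (fun d => decide (pvSnd d < t)) := by
    rw [(PySem.List.sorted_perm (valid.map pvSnd) (fun x => x) false).countP_eq,
        List.countP_map]
    rfl
  rw [hcs, hce, hvalid, List.countP_filter, List.countP_filter]
  exact pv_count_diff t ds

-- ===== VERDICT (by name: the statement is the Claim_ definition above) =====
theorem count_doctors_during_inspections_spec : Claim_equal_count_doctors_during_inspections := by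
  intro inspection_times doctor_schedules _hdom _hpre
  unfold Spec_count_doctors_during_inspections
  exact pv_main inspection_times doctor_schedules
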